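-- pv_equiv track=rewrite | github.com/cfpaperdragon/advent-of-code-2020 | Sandbox/inverted.py | inverted_merge
-- ===== SOURCE A (Python) =====
-- def inverted_merge(str1, str2):
--     index = 1
--     result = ""
--     while(len(str1) >= index or len(str2) >= index):
--         if len(str1) >= index:
--             result += str1[-index]
--         if len(str2) >= index:
--             result += str2[-index]
--         index += 1
--
--     return result
-- ===== SOURCE B (Python) =====
-- def inverted_merge(str1, str2):
--     r1, r2 = str1[::-1], str2[::-1]
--     return ("".join(a + b for a, b in zip(r1, r2))
--             + r1[len(r2):] + r2[len(r1):])
-- ===== Notes on version B (the rewrite author's own statement) =====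
-- stated objective: faster
-- what changed: Replaced the negative-index while loop with two length guards (building the result by repeated string concatenation) by reversing both strings once and interleaving them front-to-back with zip plus the leftover tail, joined in one pass.
import Mathlib
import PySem

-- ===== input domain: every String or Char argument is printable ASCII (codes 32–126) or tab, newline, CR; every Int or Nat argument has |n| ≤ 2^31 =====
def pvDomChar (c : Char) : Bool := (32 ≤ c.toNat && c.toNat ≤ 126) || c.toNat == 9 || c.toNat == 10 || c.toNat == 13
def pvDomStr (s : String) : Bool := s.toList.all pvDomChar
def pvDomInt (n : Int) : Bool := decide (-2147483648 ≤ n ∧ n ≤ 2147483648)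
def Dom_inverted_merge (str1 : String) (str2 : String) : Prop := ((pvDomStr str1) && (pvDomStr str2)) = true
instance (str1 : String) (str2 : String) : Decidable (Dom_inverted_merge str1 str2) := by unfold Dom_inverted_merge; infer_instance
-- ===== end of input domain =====

-- B reverses both strings once and interleaves them front-to-back with zip plus the
-- leftover tail, instead of A's negative-index while loop with two length guards (idiomatic).

-- ===== PORT A =====
-- A's while loop: index from 1 while either string still has a char at -index;
-- pyGetD's default is never used (the guard ensures the index is in range).
def invLoop (s1 s2 : List Char) (index : Nat) (result : List Char) : List Char :=
  if index ≤ s1.length ∨ index ≤ s2.length then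
    invLoop s1 s2 (index + 1)
      ((result ++ (if index ≤ s1.length then [PySem.List.pyGetD s1 (-(index : Int)) ' '] else []))
        ++ (if index ≤ s2.length then [PySem.List.pyGetD s2 (-(index : Int)) ' '] else []))
  else result
termination_by s1.length + s2.length + 1 - index
decreasing_by omega

def inverted_merge (str1 : String) (str2 : String) : String :=
  String.mk (invLoop str1.toList str2.toList 1 [])

-- ===== PORT B =====
-- ''.join(a+b for a,b in zip(r1,r2)) + r1[len(r2):] + r2[len(r1):]
def interTail (a b : List Char) : List Char :=
  (List.zip a b).flatMap (fun p => [p.1, p.2]) ++ a.drop b.length ++ b.drop a.length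

def inverted_merge_alt (str1 : String) (str2 : String) : String :=
  String.mk (interTail str1.toList.reverse str2.toList.reverse)

-- ===== PRECONDITION & SPEC =====
def Spec_inverted_merge (str1 : String) (str2 : String) (out : String) : Prop := out = inverted_merge_alt str1 str2
instance (str1 : String) (str2 : String) (out : String) : Decidable (Spec_inverted_merge str1 str2 out) := by unfold Spec_inverted_merge; infer_instance

-- ===== CLAIM (what is proved, stated in full; the proofs are below) =====
def Claim_equal_inverted_merge : Prop := ∀ (str1 : String) (str2 : String), Dom_inverted_merge str1 str2 → Spec_inverted_merge str1 str2 (inverted_merge str1 str2)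

-- ===== LEMMAS AND PROOFS =====
lemma interTail_nil_left (b : List Char) : interTail [] b = b := by simp [interTail]

lemma interTail_nil_right (a : List Char) : interTail a [] = a := by simp [interTail]

lemma interTail_cons_cons (x y : Char) (a b : List Char) :
    interTail (x :: a) (y :: b) = x :: y :: interTail a b := by
  simp [interTail]

lemma invLoop_eq (s1 s2 : List Char) (j : Nat) (res : List Char) :
    invLoop s1 s2 (j + 1) res =
      res ++ interTail (s1.reverse.drop j) (s2.reverse.drop j) := by
  have H : ∀ n j res, s1.length + s2.length + 1 - (j + 1) ≤ n →
      invLoop s1 s2 (j + 1) res =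
        res ++ interTail (s1.reverse.drop j) (s2.reverse.drop j) := by
    intro n
    induction n with
    | zero =>
      intro j res hn
      have h1 : s1.length ≤ j := by omega
      have h2 : s2.length ≤ j := by omega
      rw [invLoop, if_neg (by omega)]
      rw [List.drop_eq_nil_of_le (by simpa using h1),
          List.drop_eq_nil_of_le (by simpa using h2)]
      simp [interTail_nil_left]
    | succ n ih =>
      intro j res hn
      by_cases hg : j + 1 ≤ s1.length ∨ j + 1 ≤ s2.length
      · rw [invLoop, if_pos hg]
        rw [ih (j + 1) _ (by omega)]
        have get1 : ∀ h : j + 1 ≤ s1.length,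
            PySem.List.pyGetD s1 (-((j + 1 : Nat) : Int)) ' ' =
              s1.reverse[j]'(by simpa using by omega) := by
          intro h
          rw [PySem.List.pyGetD_neg_natCast s1 (j + 1) ' ' (by omega) h]
          rw [List.getElem_reverse]
          congr 1
          omega
        rcases Nat.lt_or_ge j s1.length with hj1 | hj1
        · have hd1 : s1.reverse.drop j = s1.reverse[j]'(by simpa using hj1) :: s1.reverse.drop (j + 1) :=
            List.drop_eq_getElem_cons (by simpa using hj1)
          rcases Nat.lt_or_ge j s2.length with hj2 | hj2
          · have hd2 : s2.reverse.drop j = s2.reverse[j]'(by simpa using hj2) :: s2.reverse.drop (j + 1) :=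
              List.drop_eq_getElem_cons (by simpa using hj2)
            have get2 : PySem.List.pyGetD s2 (-((j + 1 : Nat) : Int)) ' ' =
                s2.reverse[j]'(by simpa using hj2) := by
              rw [PySem.List.pyGetD_neg_natCast s2 (j + 1) ' ' (by omega) (by omega)]
              rw [List.getElem_reverse]
              congr 1
              omega
            rw [if_pos (by omega), if_pos (by omega), get1 (by omega), get2,
                hd1, hd2, interTail_cons_cons]
            simp
          · -- s2 exhausted
            have hd2 : s2.reverse.drop j = [] := List.drop_eq_nil_of_le (by simpa using hj2)
            have hd2' : s2.reverse.drop (j + 1) = [] := List.drop_eq_nil_of_le (by simp; omega)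
            rw [if_pos (by omega), if_neg (by omega), get1 (by omega),
                hd1, hd2, hd2', interTail_nil_right, interTail_nil_right]
            simp
        · -- s1 exhausted, s2 still has chars
          have hj2 : j < s2.length := by omega
          have hd1 : s1.reverse.drop j = [] := List.drop_eq_nil_of_le (by simpa using hj1)
          have hd1' : s1.reverse.drop (j + 1) = [] := List.drop_eq_nil_of_le (by simp; omega)
          have hd2 : s2.reverse.drop j = s2.reverse[j]'(by simpa using hj2) :: s2.reverse.drop (j + 1) :=
            List.drop_eq_getElem_cons (by simpa using hj2)
          have get2 : PySem.List.pyGetD s2 (-((j + 1 : Nat) : Int)) ' ' =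
              s2.reverse[j]'(by simpa using hj2) := by
            rw [PySem.List.pyGetD_neg_natCast s2 (j + 1) ' ' (by omega) (by omega)]
            rw [List.getElem_reverse]
            congr 1
            omega
          rw [if_neg (by omega), if_pos (by omega), get2,
              hd1, hd1', hd2, interTail_nil_left, interTail_nil_left]
          simp
      · rw [invLoop, if_neg hg]
        have h1 : s1.length ≤ j := by omega
        have h2 : s2.length ≤ j := by omega
        rw [List.drop_eq_nil_of_le (by simpa using h1),
            List.drop_eq_nil_of_le (by simpa using h2)]
        simp [interTail_nil_left]
  exact H _ j res le_rfl

-- ===== VERDICT (by name: the statement is the Claim_ definition above) =====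
theorem inverted_merge_spec : Claim_equal_inverted_merge := by
  intro str1 str2 _
  unfold Spec_inverted_merge inverted_merge inverted_merge_alt
  rw [show (1 : Nat) = 0 + 1 from rfl, invLoop_eq]
  simp
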